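-- pv_equiv track=rewrite | github.com/YosysHQ/icestorm | icefuzz/tests/pllauto/pllauto.py | get_param_value
-- ===== SOURCE A (Python) =====
-- def get_param_value(param_name, param_size, fuzz_bit):
--     param = str(param_size) + "'b";
--     for i in range(param_size - 1, -1, -1):
--         if fuzz_bit == param_name + "_" + str(i):
--             param += '1'
--         else:
--             param += '0'
--     return param
-- ===== SOURCE B (Python) =====
-- def get_param_value(param_name, param_size, fuzz_bit):
--     n = param_size if 0 < param_size else 0
--     prefix = param_name + "_"
--     idx = -1
--     if fuzz_bit.startswith(prefix):
--         suffix = fuzz_bit[len(prefix):]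
--         if suffix.isdigit():
--             v = 0
--             for ch in suffix:
--                 v = 10 * v + (ord(ch) - 48)
--             if v < n and suffix == str(v):
--                 idx = v
--     if idx < 0:
--         return str(param_size) + "'b" + "0" * n
--     return str(param_size) + "'b" + "0" * (n - 1 - idx) + "1" + "0" * idx
-- ===== Notes on version B (the rewrite author's own statement) =====
-- stated objective: faster
-- what changed: Instead of looping over every bit position and building str(i) for a string comparison at each, B parses the single candidate index out of fuzz_bit once (prefix check, digit check, canonical-decimal check via suffix == str(v)) and constructs the bit string in closed form from '0'-runs and one '1'.
import Mathlib
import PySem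

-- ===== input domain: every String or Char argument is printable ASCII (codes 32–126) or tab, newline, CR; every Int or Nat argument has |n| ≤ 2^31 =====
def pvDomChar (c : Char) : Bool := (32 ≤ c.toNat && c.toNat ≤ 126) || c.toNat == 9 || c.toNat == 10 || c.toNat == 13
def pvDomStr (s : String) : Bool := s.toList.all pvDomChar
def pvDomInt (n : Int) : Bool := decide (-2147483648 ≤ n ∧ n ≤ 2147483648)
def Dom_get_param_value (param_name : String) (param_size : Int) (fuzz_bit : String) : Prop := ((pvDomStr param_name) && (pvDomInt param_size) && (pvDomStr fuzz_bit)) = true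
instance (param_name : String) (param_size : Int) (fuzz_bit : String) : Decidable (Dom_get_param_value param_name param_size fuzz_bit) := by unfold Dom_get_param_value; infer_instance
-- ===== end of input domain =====

-- B replaces A's per-bit scan (build str(i) and compare for every i) by parsing the single
-- candidate index out of fuzz_bit once and emitting the bit string in closed form (objective:
-- faster, one parse instead of param_size string builds/compares).

-- ===== PORT A =====
def get_param_value (param_name : String) (param_size : Int) (fuzz_bit : String) : String :=
  let param := PySem.Int.toStr param_size ++ "'b"
  (PySem.List.pyRange (param_size - 1) (-1) (-1)).foldl
    (fun param i =>
      if fuzz_bit == param_name ++ "_" ++ PySem.Int.toStr i then param ++ "1" else param ++ "0")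
    param

-- ===== PORT B =====
-- '0' * k (str * int) is ported via PySem.List.pyRepeat on the code points (exact);
-- ord(ch) - 48 is Char.toNat - 48 (exact on ASCII digits).
def get_param_value_alt (param_name : String) (param_size : Int) (fuzz_bit : String) : String :=
  let n : Int := if 0 < param_size then param_size else 0
  let pfx := param_name ++ "_"
  let idx : Int :=
    if PySem.Str.startswith fuzz_bit pfx then
      let suffix := PySem.Str.slice fuzz_bit (some (PySem.Str.len pfx)) none
      if PySem.Str.strIsdigit suffix then
        let v := suffix.toList.foldl (fun v c => 10 * v + ((c.toNat : Int) - 48)) 0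
        if v < n && suffix == PySem.Int.toStr v then v else -1
      else -1
    else -1
  if idx < 0 then
    PySem.Int.toStr param_size ++ "'b" ++ String.ofList (PySem.List.pyRepeat ['0'] n)
  else
    PySem.Int.toStr param_size ++ "'b" ++ String.ofList (PySem.List.pyRepeat ['0'] (n - 1 - idx))
      ++ "1" ++ String.ofList (PySem.List.pyRepeat ['0'] idx)

-- ===== PRECONDITION & SPEC =====
def Spec_get_param_value (param_name : String) (param_size : Int) (fuzz_bit : String) (out : String) : Prop := out = get_param_value_alt param_name param_size fuzz_bit
instance (param_name : String) (param_size : Int) (fuzz_bit : String) (out : String) : Decidable (Spec_get_param_value param_name param_size fuzz_bit out) := by unfold Spec_get_param_value; infer_instance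

-- ===== CLAIM (what is proved, stated in full; the proofs are below) =====
def Claim_equal_get_param_value : Prop := ∀ (param_name : String) (param_size : Int) (fuzz_bit : String), Dom_get_param_value param_name param_size fuzz_bit → Spec_get_param_value param_name param_size fuzz_bit (get_param_value param_name param_size fuzz_bit)

-- ===== LEMMAS AND PROOFS =====

-- Facts about Nat.toDigits 10 (the digits PySem.Int.toStr emits for a nonnegative int).
theorem pvToDigitsCore_acc (n : Nat) : ∀ (f : Nat) (l : List Char), n < f →
    Nat.toDigitsCore 10 f n l = Nat.toDigitsCore 10 (n+1) n [] ++ l := by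
  induction n using Nat.strong_induction_on with
  | _ n ih =>
    intro f l hf
    match f, hf with
    | f+1, hf =>
      rw [Nat.toDigitsCore]
      by_cases h : n / 10 = 0
      · simp only [h, if_true]
        rw [Nat.toDigitsCore]
        simp [h]
      · simp only [h, if_false]
        have hq : n / 10 < n := Nat.div_lt_self (by omega) (by norm_num)
        rw [ih (n/10) hq f _ (by omega)]
        conv_rhs => rw [Nat.toDigitsCore]
        simp only [h, if_false]
        rw [ih (n/10) hq n _ (by omega)]
        simp

theorem pvToDigits_ten_step (m : Nat) (h : 10 ≤ m) :
    Nat.toDigits 10 m = Nat.toDigits 10 (m/10) ++ [Nat.digitChar (m%10)] := by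
  rw [Nat.toDigits, Nat.toDigitsCore]
  have h0 : ¬ m / 10 = 0 := by omega
  simp only [h0, if_false]
  rw [pvToDigitsCore_acc (m/10) m _ (by omega)]
  rfl

theorem pvToDigits_ten_small (m : Nat) (h : m < 10) :
    Nat.toDigits 10 m = [Nat.digitChar m] := by
  rw [Nat.toDigits, Nat.toDigitsCore]
  have h0 : m / 10 = 0 := by omega
  simp [h0, Nat.mod_eq_of_lt h]

theorem pvDigitChar_isdigit (r : Nat) (h : r < 10) : PySem.Chars.isdigit (Nat.digitChar r) = true := by
  interval_cases r <;> decide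

theorem pvDigitChar_val (r : Nat) (h : r < 10) : ((Nat.digitChar r).toNat : Int) - 48 = r := by
  interval_cases r <;> decide

-- the digit-accumulating loop of B, as a function of the character list
def pvParseFold (cs : List Char) : Int := cs.foldl (fun v c => 10 * v + ((c.toNat : Int) - 48)) 0

theorem pvToDigits_all_digit (m : Nat) : ∀ c ∈ Nat.toDigits 10 m, PySem.Chars.isdigit c = true := by
  induction m using Nat.strong_induction_on with
  | _ m ih =>
    by_cases h : m < 10
    · rw [pvToDigits_ten_small m h]
      simp [pvDigitChar_isdigit m h]
    · rw [pvToDigits_ten_step m (by omega)]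
      intro c hc
      rcases List.mem_append.mp hc with h1 | h1
      · exact ih (m/10) (Nat.div_lt_self (by omega) (by norm_num)) c h1
      · simp at h1; subst h1; exact pvDigitChar_isdigit _ (Nat.mod_lt _ (by norm_num))

theorem pvToDigits_ne_nil (m : Nat) : Nat.toDigits 10 m ≠ [] := by
  by_cases h : m < 10
  · rw [pvToDigits_ten_small m h]; simp
  · rw [pvToDigits_ten_step m (by omega)]; simp

theorem pvParseFold_toDigits (m : Nat) : pvParseFold (Nat.toDigits 10 m) = m := by
  induction m using Nat.strong_induction_on with
  | _ m ih =>
    by_cases h : m < 10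
    · rw [pvToDigits_ten_small m h]
      simp [pvParseFold, pvDigitChar_val m h]
    · rw [pvToDigits_ten_step m (by omega)]
      have := ih (m/10) (Nat.div_lt_self (by omega) (by norm_num))
      simp only [pvParseFold, List.foldl_append] at *
      rw [this, List.foldl_cons, List.foldl_nil,
        pvDigitChar_val _ (Nat.mod_lt _ (by norm_num))]
      omega

theorem pvParseFold_nonneg (cs : List Char) (h : ∀ c ∈ cs, PySem.Chars.isdigit c = true) :
    0 ≤ pvParseFold cs := by
  suffices H : ∀ a : Int, 0 ≤ a → 0 ≤ cs.foldl (fun v c => 10 * v + ((c.toNat : Int) - 48)) a by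
    exact H 0 le_rfl
  induction cs with
  | nil => intro a ha; simpa using ha
  | cons c cs ihc =>
    intro a ha
    have hc := h c (by simp)
    have h48 : 48 ≤ c.toNat := by
      simp [PySem.Chars.isdigit, Char.le_def] at hc
      exact hc.1
    rw [List.foldl_cons]
    apply ihc (fun d hd => h d (by simp [hd]))
    have : (48 : Int) ≤ c.toNat := by exact_mod_cast h48
    omega

-- the one-hot pattern: range map with a single '1'
theorem pvOneHot (N k : Nat) (hk : k < N) (f : Nat → Char)
    (hf : ∀ j < N, f j = if j = N - 1 - k then '1' else '0') :
    (List.range N).map f = List.replicate (N - 1 - k) '0' ++ '1' :: List.replicate k '0' := by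
  apply List.ext_getElem
  · simp; omega
  · intro j h1 h2
    have hj : j < N := by simpa using h1
    rw [List.getElem_map, List.getElem_range, hf j hj]
    by_cases hje : j = N - 1 - k
    · subst hje
      rw [List.getElem_append_right (by simp)]
      simp
    · rcases Nat.lt_or_ge j (N - 1 - k) with hlt | hge
      · rw [List.getElem_append_left (by simpa using hlt)]
        simp [hje]
      · rw [List.getElem_append_right (by simpa using hge)]
        simp only [List.length_replicate, List.getElem_cons]
        have h0 : ¬ j - (N - 1 - k) = 0 := by omega
        simp [hje, h0]

-- A's loop shape, condition abstracted
theorem pvFoldA' (cond : Int → Bool) (l : List Int) (p : String) :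
    (l.foldl (fun param i => if cond i then param ++ "1" else param ++ "0") p).toList
      = p.toList ++ l.map (fun i => if cond i then '1' else '0') := by
  induction l generalizing p with
  | nil => simp
  | cons i l ih =>
    rw [List.foldl_cons, ih, List.map_cons]
    by_cases h : cond i = true <;> simp [h, String.toList_append]

theorem pvToChars_nonneg (i : Int) (hi : 0 ≤ i) :
    PySem.Int.toChars i = Nat.toDigits 10 i.toNat := by
  simp [PySem.Int.toChars, not_lt.2 hi]

-- A's bit list when fuzz_bit names index k (one-hot at position N-1-k)
theorem pvHmapPos (pn fb : String) (ps : Int) (k : Nat) (hkN : k < ps.toNat)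
    (hcond : ∀ i : Int, (fb == pn ++ "_" ++ PySem.Int.toStr i) = true ↔
      fb.toList = (pn ++ "_").toList ++ PySem.Int.toChars i)
    (hfb : fb.toList = (pn ++ "_").toList ++ Nat.toDigits 10 k) :
    (List.range ps.toNat).map (fun (j : Nat) =>
        if fb == pn ++ "_" ++ PySem.Int.toStr (ps - 1 - (j : Int)) then '1' else '0')
      = List.replicate (ps.toNat - 1 - k) '0' ++ '1' :: List.replicate k '0' := by
  apply pvOneHot ps.toNat k hkN
  intro j hj
  by_cases hc : (fb == pn ++ "_" ++ PySem.Int.toStr (ps - 1 - (j : Int))) = true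
  · have hl := (hcond _).mp hc
    rw [hfb] at hl
    have hi0 : (0 : Int) ≤ ps - 1 - (j : Int) := by omega
    rw [pvToChars_nonneg _ hi0] at hl
    have heq : Nat.toDigits 10 ((ps - 1 - (j : Int)).toNat) = Nat.toDigits 10 k :=
      List.append_cancel_left hl.symm
    have h1 := pvParseFold_toDigits ((ps - 1 - (j : Int)).toNat)
    rw [heq, pvParseFold_toDigits k] at h1
    have hje : j = ps.toNat - 1 - k := by omega
    subst hje
    rw [if_pos hc, if_pos rfl]
  · have hj2 : j ≠ ps.toNat - 1 - k := by
      intro hje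
      apply hc
      apply (hcond _).mpr
      rw [hfb]
      congr 1
      rw [pvToChars_nonneg _ (by omega)]
      congr 1
      omega
    rw [if_neg hc, if_neg hj2]

-- A's bit list when fuzz_bit names no index (all zeros)
theorem pvHmapNeg (pn fb : String) (ps : Int)
    (hcond : ∀ i : Int, (fb == pn ++ "_" ++ PySem.Int.toStr i) = true ↔
      fb.toList = (pn ++ "_").toList ++ PySem.Int.toChars i)
    (hex : ¬ ∃ k : Nat, k < ps.toNat ∧ fb.toList = (pn ++ "_").toList ++ Nat.toDigits 10 k) :
    (List.range ps.toNat).map (fun (j : Nat) =>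
        if fb == pn ++ "_" ++ PySem.Int.toStr (ps - 1 - (j : Int)) then '1' else '0')
      = List.replicate ps.toNat '0' := by
  rw [List.eq_replicate_iff]
  constructor
  · simp
  · intro c hc
    simp only [List.mem_map, List.mem_range] at hc
    obtain ⟨j, hj, hcj⟩ := hc
    rw [if_neg] at hcj
    · exact hcj.symm
    · intro hcond'
      have hl := (hcond _).mp hcond'
      have hi0 : (0 : Int) ≤ ps - 1 - (j : Int) := by omega
      rw [pvToChars_nonneg _ hi0] at hl
      exact hex ⟨(ps - 1 - (j : Int)).toNat, by omega, hl⟩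

-- B when the parse succeeds with index k
theorem pvBpos (pn fb : String) (ps : Int) (k : Nat) (hkN : k < ps.toNat)
    (hn : (if 0 < ps then ps else 0) = ((ps.toNat : Nat) : Int))
    (hsw : PySem.Str.startswith fb (pn ++ "_") = true)
    (hdig : PySem.Str.strIsdigit (PySem.Str.slice fb (some (PySem.Str.len (pn ++ "_"))) none) = true)
    (hv : (PySem.Str.slice fb (some (PySem.Str.len (pn ++ "_"))) none).toList.foldl
        (fun v c => 10 * v + ((c.toNat : Int) - 48)) 0 = (k : Int))
    (hsx : PySem.Str.slice fb (some (PySem.Str.len (pn ++ "_"))) none = PySem.Int.toStr (k : Int)) :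
    get_param_value_alt pn ps fb
      = PySem.Int.toStr ps ++ "'b"
          ++ String.ofList (PySem.List.pyRepeat ['0'] ((ps.toNat : Int) - 1 - (k : Int)))
          ++ "1" ++ String.ofList (PySem.List.pyRepeat ['0'] (k : Int)) := by
  simp only [get_param_value_alt, hn, hsw, if_true]
  rw [if_pos hdig, hv, hsx]
  rw [if_pos (show (decide ((k : Int) < ((ps.toNat : Nat) : Int))
      && (PySem.Int.toStr (k : Int) == PySem.Int.toStr (k : Int))) = true by
    simp only [beq_self_eq_true, Bool.and_true, decide_eq_true_eq]
    exact_mod_cast hkN)]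
  rw [if_neg (by omega : ¬ ((k : Int) < 0))]

-- B when no parse succeeds
theorem pvBneg (pn fb : String) (ps : Int)
    (hn : (if 0 < ps then ps else 0) = ((ps.toNat : Nat) : Int))
    (hsuffix : (PySem.Str.slice fb (some (PySem.Str.len (pn ++ "_"))) none).toList
      = fb.toList.drop (pn ++ "_").toList.length)
    (hex : ¬ ∃ k : Nat, k < ps.toNat ∧ fb.toList = (pn ++ "_").toList ++ Nat.toDigits 10 k) :
    get_param_value_alt pn ps fb
      = PySem.Int.toStr ps ++ "'b" ++ String.ofList (PySem.List.pyRepeat ['0'] ((ps.toNat : Nat) : Int)) := by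
  have hnone : ∀ i : Int, 0 ≤ i → i < ((ps.toNat : Nat) : Int) →
      ¬ fb.toList = (pn ++ "_").toList ++ PySem.Int.toChars i := by
    intro i h0 hiN hcon
    exact hex ⟨i.toNat, by omega, by rw [hcon, pvToChars_nonneg _ h0]⟩
  simp only [get_param_value_alt, hn]
  split_ifs with h1 h2 h3 h4 <;> try rfl
  all_goals exfalso
  all_goals try omega
  set v := (PySem.Str.slice fb (some (PySem.Str.len (pn ++ "_"))) none).toList.foldl
      (fun v c => 10 * v + ((c.toNat : Int) - 48)) 0 with hvdef
  obtain ⟨hlt, hbeq⟩ := Bool.and_eq_true_iff.mp h3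
  have hdigits : ∀ c ∈ (PySem.Str.slice fb (some (PySem.Str.len (pn ++ "_"))) none).toList,
      PySem.Chars.isdigit c = true := by
    rw [PySem.Str.strIsdigit_eq, PySem.Chars.strIsdigit, Bool.and_eq_true_iff] at h2
    simpa [List.all_eq_true] using h2.2
  have hv0 : (0 : Int) ≤ v := hvdef ▸ pvParseFold_nonneg _ hdigits
  have hpref : (pn ++ "_").toList <+: fb.toList := by
    rw [PySem.Str.startswith_eq] at h1
    exact (PySem.Chars.startswith_iff _ _).mp h1
  obtain ⟨t, ht⟩ := hpref
  have hsuf : (PySem.Str.slice fb (some (PySem.Str.len (pn ++ "_"))) none).toList = t := by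
    rw [hsuffix, ← ht, List.drop_left]
  refine hnone v hv0 (of_decide_eq_true hlt) ?_
  rw [← ht, ← hsuf, beq_iff_eq.mp hbeq, PySem.Int.toList_toStr]

-- glueing the character lists back into the result strings
theorem pvListPos (ps : Int) (k N : Nat) :
    ((PySem.Int.toStr ps ++ "'b").toList ++ (List.replicate (N-1-k) '0' ++ '1' :: List.replicate k '0')) =
    (PySem.Int.toStr ps ++ "'b" ++ String.ofList (PySem.List.pyRepeat ['0'] ((N:Int) - 1 - (k:Int))) ++ "1"
      ++ String.ofList (PySem.List.pyRepeat ['0'] ((k:Nat):Int))).toList := by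
  have h2 : ((N : Int) - 1 - (k : Int)).toNat = N - 1 - k := by omega
  simp [String.toList_append, PySem.List.pyRepeat_singleton, h2]

theorem pvListNeg (ps : Int) (N : Nat) :
    ((PySem.Int.toStr ps ++ "'b").toList ++ List.replicate N '0') =
    (PySem.Int.toStr ps ++ "'b" ++ String.ofList (PySem.List.pyRepeat ['0'] ((N:Nat):Int))).toList := by
  simp [String.toList_append, PySem.List.pyRepeat_singleton]

theorem get_param_value_eq_alt (pn : String) (ps : Int) (fb : String) :
    get_param_value pn ps fb = get_param_value_alt pn ps fb := by
  have hn : (if 0 < ps then ps else 0) = ((ps.toNat : Nat) : Int) := by split_ifs <;> omega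
  have hcond : ∀ i : Int, (fb == pn ++ "_" ++ PySem.Int.toStr i) = true ↔
      fb.toList = (pn ++ "_").toList ++ PySem.Int.toChars i := by
    intro i
    rw [beq_iff_eq, ← String.toList_inj]
    simp [String.toList_append, PySem.Int.toList_toStr]
  have hA : (get_param_value pn ps fb).toList
      = (PySem.Int.toStr ps ++ "'b").toList ++
        (List.range ps.toNat).map (fun (j : Nat) =>
          if fb == pn ++ "_" ++ PySem.Int.toStr (ps - 1 - (j : Int)) then '1' else '0') := by
    unfold get_param_value
    rw [pvFoldA']
    congr 1
    rw [PySem.List.pyRange_neg_one]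
    have h1 : (ps - 1 - (-1)).toNat = ps.toNat := by omega
    rw [h1, List.map_map]
    simp [Function.comp_def]
  have hsuffix : (PySem.Str.slice fb (some (PySem.Str.len (pn ++ "_"))) none).toList
      = fb.toList.drop (pn ++ "_").toList.length := by
    rw [PySem.Str.toList_slice, PySem.Chars.slice_eq_listSlice, PySem.Str.len_eq,
      PySem.List.slice_from fb.toList (by positivity)]
    simp
  by_cases hex : ∃ k : Nat, k < ps.toNat ∧ fb.toList = (pn ++ "_").toList ++ Nat.toDigits 10 k
  · obtain ⟨k, hkN, hfb⟩ := hex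
    have hsw : PySem.Str.startswith fb (pn ++ "_") = true := by
      rw [PySem.Str.startswith_eq]
      exact (PySem.Chars.startswith_iff _ _).mpr ⟨Nat.toDigits 10 k, hfb.symm⟩
    have hsl : (PySem.Str.slice fb (some (PySem.Str.len (pn ++ "_"))) none).toList
        = Nat.toDigits 10 k := by
      rw [hsuffix, hfb, List.drop_left]
    have hdig : PySem.Str.strIsdigit
        (PySem.Str.slice fb (some (PySem.Str.len (pn ++ "_"))) none) = true := by
      rw [PySem.Str.strIsdigit_eq, hsl, PySem.Chars.strIsdigit]
      simp [pvToDigits_ne_nil k, List.all_eq_true]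
      exact fun c hc => pvToDigits_all_digit k c hc
    have hv : (PySem.Str.slice fb (some (PySem.Str.len (pn ++ "_"))) none).toList.foldl
        (fun v c => 10 * v + ((c.toNat : Int) - 48)) 0 = (k : Int) := by
      rw [hsl]; exact pvParseFold_toDigits k
    have hsx : PySem.Str.slice fb (some (PySem.Str.len (pn ++ "_"))) none
        = PySem.Int.toStr (k : Int) := by
      rw [← String.toList_inj, hsl, PySem.Int.toList_toStr,
        pvToChars_nonneg _ (by positivity)]
      simp
    refine String.toList_inj.mp ?_
    rw [hA, pvHmapPos pn fb ps k hkN hcond hfb, pvBpos pn fb ps k hkN hn hsw hdig hv hsx]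
    exact pvListPos ps k ps.toNat
  · refine String.toList_inj.mp ?_
    rw [hA, pvHmapNeg pn fb ps hcond hex, pvBneg pn fb ps hn hsuffix hex]
    exact pvListNeg ps ps.toNat

-- ===== VERDICT (by name: the statement is the Claim_ definition above) =====
theorem get_param_value_spec : Claim_equal_get_param_value := by
  intro pn ps fb _
  unfold Spec_get_param_value
  exact get_param_value_eq_alt pn ps fb
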